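-- pv_equiv track=rewrite | github.com/ashwinsharma89/pca_agent | streamlit_reporting.py | find_matching_column
-- ===== SOURCE A (Python) =====
-- from typing import Dict, List, Optional, Tuple, Any
--
-- def find_matching_column(placeholder: str, columns: List[str]) -> Optional[str]:
--     """Find best matching column for a placeholder."""
--     # Clean placeholder
--     clean_placeholder = placeholder.strip('{}[]<>').lower().replace('_', ' ').replace('-', ' ')
--
--     # Try exact match
--     for col in columns:
--         if col.lower() == clean_placeholder:
--             return col
--
--     # Try partial match
--     for col in columns:
--         if clean_placeholder in col.lower() or col.lower() in clean_placeholder: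
--             return col
--
--     return None
-- ===== SOURCE B (Python) =====
-- def find_matching_column(placeholder, columns):
--     """Find best matching column for a placeholder."""
--     clean_placeholder = placeholder.strip('{}[]<>').lower().replace('_', ' ').replace('-', ' ')
--     first_partial = None
--     for col in columns:
--         lc = col.lower()
--         if lc == clean_placeholder:
--             return col
--         if first_partial is None and (clean_placeholder in lc or lc in clean_placeholder):
--             first_partial = col
--     return first_partial
-- ===== Notes on version B (the rewrite author's own statement) =====
-- stated objective: alternative
-- what changed: Replaces A's two sequential scans (exact pass, then partial pass) with a single pass that returns immediately on an exact match while recording the first partial match in an accumulator returned after the loop.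
import Mathlib
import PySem

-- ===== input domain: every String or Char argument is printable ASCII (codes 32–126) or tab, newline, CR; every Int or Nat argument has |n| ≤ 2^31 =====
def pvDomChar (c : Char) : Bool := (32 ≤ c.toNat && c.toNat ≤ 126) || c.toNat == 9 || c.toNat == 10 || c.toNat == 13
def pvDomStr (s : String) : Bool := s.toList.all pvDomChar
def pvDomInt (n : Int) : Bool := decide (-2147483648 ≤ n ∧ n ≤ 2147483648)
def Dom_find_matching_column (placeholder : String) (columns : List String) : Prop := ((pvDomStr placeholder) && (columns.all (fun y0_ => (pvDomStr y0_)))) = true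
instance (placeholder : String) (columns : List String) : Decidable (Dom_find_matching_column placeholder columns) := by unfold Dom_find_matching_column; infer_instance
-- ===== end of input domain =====

-- B merges A's two sequential scans into a single pass that records the first partial match
-- while still returning immediately on an exact match (objective: alternative decomposition).


-- ===== PORT A =====
-- placeholder.strip('{}[]<>').lower().replace('_', ' ').replace('-', ' ')
def pvClean (placeholder : String) : String :=
  PySem.Str.replace (PySem.Str.replace
    (PySem.Str.lower (PySem.Str.stripChars placeholder "{}[]<>")) "_" " ") "-" " "

-- first loop of A: exact match
def pvFindExact (cp : String) : List String → Option String
  | [] => none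
  | col :: rest => if PySem.Str.lower col == cp then some col else pvFindExact cp rest

-- second loop of A: partial match
def pvFindPartial (cp : String) : List String → Option String
  | [] => none
  | col :: rest =>
      if PySem.Str.isIn cp (PySem.Str.lower col) || PySem.Str.isIn (PySem.Str.lower col) cp
      then some col else pvFindPartial cp rest

def find_matching_column (placeholder : String) (columns : List String) : Option String :=
  let clean_placeholder := pvClean placeholder
  match pvFindExact clean_placeholder columns with
  | some col => some col
  | none => pvFindPartial clean_placeholder columns

-- ===== PORT B =====
-- single pass with a first_partial accumulator
def pvLoopB (cp : String) : List String → Option String → Option String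
  | [], first_partial => first_partial
  | col :: rest, first_partial =>
      let lc := PySem.Str.lower col
      if lc == cp then some col
      else pvLoopB cp rest
        (if first_partial.isNone && (PySem.Str.isIn cp lc || PySem.Str.isIn lc cp)
         then some col else first_partial)

def find_matching_column_alt (placeholder : String) (columns : List String) : Option String :=
  let clean_placeholder := pvClean placeholder
  pvLoopB clean_placeholder columns none

-- ===== PRECONDITION & SPEC =====
def Spec_find_matching_column (placeholder : String) (columns : List String) (out : Option String) : Prop := out = find_matching_column_alt placeholder columns
instance (placeholder : String) (columns : List String) (out : Option String) : Decidable (Spec_find_matching_column placeholder columns out) := by unfold Spec_find_matching_column; infer_instance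

-- ===== CLAIM (what is proved, stated in full; the proofs are below) =====
def Claim_equal_find_matching_column : Prop := ∀ (placeholder : String) (columns : List String), Dom_find_matching_column placeholder columns → Spec_find_matching_column placeholder columns (find_matching_column placeholder columns)

-- ===== LEMMAS AND PROOFS =====
-- invariant of B's loop: it returns the exact match if any, else the pending
-- first_partial, else the first partial match
theorem pvLoopB_eq (cp : String) (cols : List String) (fp : Option String) :
    pvLoopB cp cols fp =
      match pvFindExact cp cols with
      | some col => some col
      | none => match fp with
                | some x => some x
                | none => pvFindPartial cp cols := by
  induction cols generalizing fp with
  | nil => cases fp <;> simp [pvLoopB, pvFindExact, pvFindPartial]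
  | cons col rest ih =>
    simp only [pvLoopB, pvFindExact, pvFindPartial]
    by_cases hx : (PySem.Str.lower col == cp) = true
    · simp [hx]
    · simp only [hx, if_neg, Bool.false_eq_true, not_false_eq_true]
      rw [ih]
      cases hfp : fp <;>
        cases hpc : (PySem.Str.isIn cp (PySem.Str.lower col) || PySem.Str.isIn (PySem.Str.lower col) cp) <;>
        simp

theorem find_matching_column_eq (placeholder : String) (columns : List String) :
    find_matching_column placeholder columns = find_matching_column_alt placeholder columns := by
  unfold find_matching_column find_matching_column_alt
  rw [pvLoopB_eq]

-- ===== VERDICT (by name: the statement is the Claim_ definition above) =====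
theorem find_matching_column_spec : Claim_equal_find_matching_column := by
  intro placeholder columns _
  exact find_matching_column_eq placeholder columns
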